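-- pv_equiv track=rewrite | github.com/MakinFantasy/xo | 22/12.06/23.py | f
-- ===== SOURCE A (Python) =====
-- def f(x):
--     if x < 10:
--         return x
--     else:
--         m = f(x // 10)
--         if m < x % 10:
--             return x % 10
--         else:
--             return m
-- ===== SOURCE B (Python) =====
-- def f(x):
--     if x < 10:
--         return x
--     res = 0
--     while x > 0:
--         d = x % 10
--         if d > res:
--             res = d
--         x //= 10
--     return res
-- ===== Notes on version B (the rewrite author's own statement) =====
-- stated objective: alternative
-- what changed: Replaces the recursive post-order max over digits with an explicit iterative loop carrying a running-max accumulator over x's digits.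
import Mathlib
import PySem

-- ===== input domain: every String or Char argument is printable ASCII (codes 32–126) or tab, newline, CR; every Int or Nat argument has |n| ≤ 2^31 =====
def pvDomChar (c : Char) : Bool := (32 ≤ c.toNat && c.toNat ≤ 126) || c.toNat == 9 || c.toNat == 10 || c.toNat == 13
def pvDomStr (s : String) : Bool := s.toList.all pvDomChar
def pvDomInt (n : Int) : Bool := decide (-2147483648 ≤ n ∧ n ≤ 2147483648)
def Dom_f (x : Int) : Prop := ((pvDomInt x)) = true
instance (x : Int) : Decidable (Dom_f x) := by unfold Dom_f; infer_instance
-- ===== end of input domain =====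

-- B replaces A's recursive post-order digit max by an explicit loop with a running-max accumulator (alternative decomposition, same cost).


-- ===== PORT A =====
def f (x : Int) : Int :=
  if x < 10 then x
  else
    let m := f (PySem.Int.floordiv x 10)
    if m < PySem.Int.mod x 10 then PySem.Int.mod x 10 else m
termination_by x.toNat
decreasing_by
  rename_i h
  rw [PySem.Int.floordiv_eq_ediv_of_pos (by omega : (0:Int) < 10)]
  omega

-- ===== PORT B =====
-- the while loop of Source B: state (x, res)
def fAltLoop (x res : Int) : Int :=
  if x > 0 then
    let d := PySem.Int.mod x 10
    fAltLoop (PySem.Int.floordiv x 10) (if d > res then d else res)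
  else res
termination_by x.toNat
decreasing_by
  rename_i h
  rw [PySem.Int.floordiv_eq_ediv_of_pos (by omega : (0:Int) < 10)]
  omega

def f_alt (x : Int) : Int :=
  if x < 10 then x else fAltLoop x 0

-- ===== PRECONDITION & SPEC =====
def Spec_f (x : Int) (out : Int) : Prop := out = f_alt x
instance (x : Int) (out : Int) : Decidable (Spec_f x out) := by unfold Spec_f; infer_instance

-- ===== CLAIM (what is proved, stated in full; the proofs are below) =====
def Claim_equal_f : Prop := ∀ (x : Int), Dom_f x → Spec_f x (f x)

-- ===== LEMMAS AND PROOFS =====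
theorem f_pos_aux (n : Nat) : ∀ x : Int, x.toNat = n → 0 < x → 0 < f x := by
  induction n using Nat.strong_induction_on with
  | _ n ih =>
    intro x hn hx
    rw [f]
    by_cases h : x < 10
    · simpa [h] using hx
    · simp only [h, if_false]
      have h10 : PySem.Int.floordiv x 10 = x / 10 :=
        PySem.Int.floordiv_eq_ediv_of_pos (by omega)
      have hm : PySem.Int.mod x 10 = x % 10 :=
        PySem.Int.mod_eq_emod_of_pos (by omega)
      have hrec : 0 < f (PySem.Int.floordiv x 10) := by
        apply ih (PySem.Int.floordiv x 10).toNat (by rw [h10]; omega)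
          _ rfl (by rw [h10]; omega)
      split <;> omega

theorem f_pos (x : Int) (hx : 0 < x) : 0 < f x := f_pos_aux x.toNat x rfl hx

theorem fAltLoop_eq_aux (n : Nat) :
    ∀ x res : Int, x.toNat = n → 0 < x → fAltLoop x res = max res (f x) := by
  induction n using Nat.strong_induction_on with
  | _ n ih =>
    intro x res hn hx
    have h10 : PySem.Int.floordiv x 10 = x / 10 :=
      PySem.Int.floordiv_eq_ediv_of_pos (by omega)
    have hm : PySem.Int.mod x 10 = x % 10 :=
      PySem.Int.mod_eq_emod_of_pos (by omega)
    rw [fAltLoop]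
    simp only [show x > 0 by omega, if_true]
    by_cases hlt : x < 10
    · have hq : x / 10 = 0 := by omega
      rw [fAltLoop]
      rw [h10, hm, hq]
      simp only [show ¬((0:Int) > 0) by omega, if_false]
      rw [f]
      simp only [hlt, if_true]
      have hx10 : x % 10 = x := by omega
      rw [hx10]
      split <;> omega
    · have hq : 0 < x / 10 := by omega
      rw [h10, hm]
      rw [ih (x / 10).toNat (by omega) _ _ rfl hq]
      have hfx : f x = if f (x / 10) < x % 10 then x % 10 else f (x / 10) := by
        conv_lhs => rw [f]
        simp only [hlt, if_false, h10, hm]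
      rw [hfx]
      have := f_pos (x / 10) hq
      split <;> split <;> omega

theorem f_eq_alt (x : Int) : f x = f_alt x := by
  unfold f_alt
  by_cases h : x < 10
  · rw [f]; simp [h]
  · simp only [h, if_false]
    rw [fAltLoop_eq_aux x.toNat x 0 rfl (by omega)]
    have := f_pos x (by omega)
    omega

-- ===== VERDICT =====
theorem f_spec : Claim_equal_f := by
  intro x _
  unfold Spec_f
  exact f_eq_alt x
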